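-- pv_equiv track=rewrite | github.com/loveDjjj/Audio_Vedio_Detection | src/preprocess/runtime.py | build_worker_assignments
-- ===== SOURCE A (Python) =====
-- def build_worker_assignments(devices: list[int], workers_per_device: int) -> list[dict[str, int]]:
--     if not devices:
--         raise ValueError("runtime.devices must contain at least one CUDA device index.")
--     if workers_per_device < 1:
--         raise ValueError("runtime.workers_per_device must be >= 1.")
--
--     nshard = len(devices) * workers_per_device
--     assignments: list[dict[str, int]] = []
--     rank = 0
--     for _ in range(workers_per_device):
--         for device_index in devices:
--             assignments.append(
--                 {
--                     "rank": rank,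
--                     "nshard": nshard,
--                     "device_index": int(device_index),
--                 }
--             )
--             rank += 1
--     return assignments
-- ===== SOURCE B (Python) =====
-- def build_worker_assignments(devices: list[int], workers_per_device: int) -> list[dict[str, int]]:
--     if not devices:
--         raise ValueError("runtime.devices must contain at least one CUDA device index.")
--     if workers_per_device < 1:
--         raise ValueError("runtime.workers_per_device must be >= 1.")
--
--     nshard = len(devices) * workers_per_device
--     return [
--         {
--             "rank": rank,
--             "nshard": nshard,
--             "device_index": int(devices[rank % len(devices)]),
--         }
--         for rank in range(nshard)
--     ]
-- ===== Notes on version B (the rewrite author's own statement) =====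
-- stated objective: simpler
-- what changed: The nested outer-workers/inner-devices loop with a mutable rank counter is replaced by a single comprehension over range(nshard), recovering each worker's device by modular indexing devices[rank % len(devices)].
import Mathlib
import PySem

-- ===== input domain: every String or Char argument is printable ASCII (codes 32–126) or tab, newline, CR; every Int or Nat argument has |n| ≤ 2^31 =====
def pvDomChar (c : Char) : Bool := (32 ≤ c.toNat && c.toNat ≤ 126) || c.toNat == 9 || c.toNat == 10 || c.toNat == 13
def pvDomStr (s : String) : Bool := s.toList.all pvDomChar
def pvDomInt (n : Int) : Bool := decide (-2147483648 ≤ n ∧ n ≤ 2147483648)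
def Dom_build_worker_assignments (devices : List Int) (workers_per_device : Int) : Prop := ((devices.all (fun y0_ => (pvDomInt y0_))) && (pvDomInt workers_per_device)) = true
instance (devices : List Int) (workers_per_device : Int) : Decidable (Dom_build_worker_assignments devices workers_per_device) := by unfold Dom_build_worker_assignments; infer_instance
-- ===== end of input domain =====

-- B replaces the nested workers×devices loop with one pass over range(nshard), using
-- rank % len(devices) to recover each worker's device (objective: simpler decomposition).

-- ===== PORT A =====
def build_worker_assignments (devices : List Int) (workers_per_device : Int) : List (List (String × Int)) :=
  if devices = [] then []          -- Python raises ValueError here; excluded by Pre_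
  else if workers_per_device < 1 then []   -- Python raises ValueError here; excluded by Pre_
  else
    let nshard : Int := (devices.length : Int) * workers_per_device
    ((PySem.List.pyRange 0 workers_per_device 1).foldl
      (fun (st : List (List (String × Int)) × Int) _ =>
        devices.foldl
          (fun (st : List (List (String × Int)) × Int) device_index =>
            (st.1 ++ [[("rank", st.2), ("nshard", nshard), ("device_index", device_index)]],
             st.2 + 1))
          st)
      ([], 0)).1

-- ===== PORT B =====
def build_worker_assignments_alt (devices : List Int) (workers_per_device : Int) : List (List (String × Int)) :=
  if devices = [] then []          -- Python raises ValueError here; excluded by Pre_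
  else if workers_per_device < 1 then []   -- Python raises ValueError here; excluded by Pre_
  else
    let nshard : Int := (devices.length : Int) * workers_per_device
    (PySem.List.pyRange 0 nshard 1).map
      (fun rank =>
        [("rank", rank), ("nshard", nshard),
         ("device_index", PySem.List.pyGetD devices (PySem.Int.mod rank (devices.length : Int)) 0)])

-- ===== PRECONDITION & SPEC =====
-- Pre_ excludes exactly the inputs where the Python raises ValueError: empty devices or workers_per_device < 1.
def Pre_build_worker_assignments (devices : List Int) (workers_per_device : Int) : Prop :=
  devices ≠ [] ∧ 1 ≤ workers_per_device
instance (devices : List Int) (workers_per_device : Int) : Decidable (Pre_build_worker_assignments devices workers_per_device) := by unfold Pre_build_worker_assignments; infer_instance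
def pvWitness_build_worker_assignments : List Int × Int := ([0, 1], 2)

def Spec_build_worker_assignments (devices : List Int) (workers_per_device : Int) (out : List (List (String × Int))) : Prop := out = build_worker_assignments_alt devices workers_per_device
instance (devices : List Int) (workers_per_device : Int) (out : List (List (String × Int))) : Decidable (Spec_build_worker_assignments devices workers_per_device out) := by unfold Spec_build_worker_assignments; infer_instance

-- ===== CLAIM (what is proved, stated in full; the proofs are below) =====
def Claim_equal_build_worker_assignments : Prop := ∀ (devices : List Int) (workers_per_device : Int), Dom_build_worker_assignments devices workers_per_device → Pre_build_worker_assignments devices workers_per_device → Spec_build_worker_assignments devices workers_per_device (build_worker_assignments devices workers_per_device)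

-- ===== LEMMAS AND PROOFS =====

-- one output row
def pvRow (ns r d : Int) : List (String × Int) :=
  [("rank", r), ("nshard", ns), ("device_index", d)]

-- rows produced by one inner pass over ds starting at rank r
def pvRows (ns : Int) : List Int → Int → List (List (String × Int))
  | [], _ => []
  | d :: ds, r => pvRow ns r d :: pvRows ns ds (r + 1)

theorem pv_inner_foldl (ns : Int) (ds : List Int) :
    ∀ (acc : List (List (String × Int))) (r : Int),
    ds.foldl
      (fun (st : List (List (String × Int)) × Int) device_index =>
        (st.1 ++ [[("rank", st.2), ("nshard", ns), ("device_index", device_index)]], st.2 + 1))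
      (acc, r)
    = (acc ++ pvRows ns ds r, r + (ds.length : Int)) := by
  induction ds with
  | nil => intro acc r; simp [pvRows]
  | cons d ds ih =>
    intro acc r
    simp only [List.foldl_cons, pvRows, pvRow]
    rw [ih]
    simp
    omega

theorem pv_rows_drop (devices : List Int) (ns : Int) (hd : devices ≠ []) :
    ∀ (k i : Nat) (j : Nat), devices.length = i + k →
    pvRows ns (devices.drop i) ((devices.length : Int) * j + i)
    = (PySem.List.pyRange ((devices.length : Int) * j + i) ((devices.length : Int) * (j + 1)) 1).map
        (fun rank => pvRow ns rank (PySem.List.pyGetD devices (PySem.Int.mod rank (devices.length : Int)) 0)) := by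
  have hn : 0 < (devices.length : Int) := by
    have := List.length_pos_iff.mpr hd; exact_mod_cast this
  intro k
  induction k with
  | zero =>
    intro i j hik
    have hi : i = devices.length := by omega
    rw [List.drop_of_length_le (by omega)]
    rw [PySem.List.pyRange_one_eq_nil (by subst hi; nlinarith)]
    simp [pvRows]
  | succ k ih =>
    intro i j hik
    have hilt : i < devices.length := by omega
    rw [List.drop_eq_getElem_cons hilt]
    have hlt : (devices.length : Int) * j + i < (devices.length : Int) * (j + 1) := by
      have : (i : Int) < (devices.length : Int) := by exact_mod_cast hilt
      nlinarith
    rw [PySem.List.pyRange_one_cons hlt]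
    simp only [List.map_cons, pvRows]
    congr 1
    · -- head row
      have hmod : PySem.Int.mod ((devices.length : Int) * j + i) (devices.length : Int) = (i : Int) := by
        rw [PySem.Int.mod_eq_emod_of_pos hn]
        have : ((devices.length : Int) * j + i) = (i : Int) + (devices.length : Int) * j := by ring
        rw [this, Int.add_mul_emod_self_left]
        exact Int.emod_eq_of_lt (by positivity) (by exact_mod_cast hilt)
      rw [hmod]
      have : PySem.List.pyGetD devices (i : Int) 0 = devices[i] := by
        rw [PySem.List.pyGetD_natCast]
        exact List.getD_eq_getElem _ _ hilt
      rw [this]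
    · -- tail
      have := ih (i + 1) j (by omega)
      have harg : (devices.length : Int) * j + (↑(i + 1) : Int) = (devices.length : Int) * j + i + 1 := by
        push_cast; ring
      rw [harg] at this
      exact this

theorem pv_outer (devices : List Int) (ns : Int) (hd : devices ≠ []) :
    ∀ (j : Nat),
    (PySem.List.pyRange 0 (j : Int) 1).foldl
      (fun (st : List (List (String × Int)) × Int) _ =>
        devices.foldl
          (fun (st : List (List (String × Int)) × Int) device_index =>
            (st.1 ++ [[("rank", st.2), ("nshard", ns), ("device_index", device_index)]], st.2 + 1))
          st)
      ([], 0)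
    = ((PySem.List.pyRange 0 ((devices.length : Int) * j) 1).map
        (fun rank => pvRow ns rank (PySem.List.pyGetD devices (PySem.Int.mod rank (devices.length : Int)) 0)),
       (devices.length : Int) * j) := by
  have hn : 0 < (devices.length : Int) := by
    have := List.length_pos_iff.mpr hd; exact_mod_cast this
  intro j
  induction j with
  | zero => simp [PySem.List.pyRange_one_eq_nil (le_refl (0 : Int))]
  | succ j ih =>
    have hcast : ((j + 1 : Nat) : Int) = (j : Int) + 1 := by push_cast; ring
    rw [hcast, PySem.List.pyRange_one_succ_right (by positivity), List.foldl_append]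
    rw [ih]
    simp only [List.foldl_cons, List.foldl_nil]
    rw [pv_inner_foldl]
    have hdrop := pv_rows_drop devices ns hd devices.length 0 j (by omega)
    simp only [List.drop_zero, Nat.cast_zero, add_zero] at hdrop
    rw [hdrop]
    rw [← List.map_append,
        ← PySem.List.pyRange_one_append 0 ((devices.length : Int) * j) ((devices.length : Int) * ((j : Int) + 1))
          (by positivity) (by nlinarith)]
    simp only [Prod.mk.injEq]
    exact ⟨trivial, by ring⟩

-- ===== VERDICT (by name: the statement is the Claim_ definition above) =====
theorem build_worker_assignments_spec : Claim_equal_build_worker_assignments := by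
  intro devices wpd _ hpre
  obtain ⟨hd, hw⟩ := hpre
  have hwn : wpd = ((wpd.toNat : Nat) : Int) := (Int.toNat_of_nonneg (by omega)).symm
  unfold Spec_build_worker_assignments build_worker_assignments build_worker_assignments_alt
  rw [if_neg hd, if_neg (not_lt.mpr hw), if_neg hd, if_neg (not_lt.mpr hw), hwn]
  simp only [pv_outer devices ((devices.length : Int) * ((wpd.toNat : Nat) : Int)) hd wpd.toNat, pvRow]
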